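-- pv_equiv track=rewrite | github.com/coderman400/ffcs | main.py | is_course_valid
-- ===== SOURCE A (Python) =====
-- def is_course_valid(slots):
--     """Checks if slots selected for the same course do not violate the 'same category' rule."""
--     seen_categories = set()
--     for slot in slots:
--         category = slot[0]  # Get the first letter of the slot
--         if category in seen_categories:
--             return False  # Conflict: Two slots from the same category
--         seen_categories.add(category)
--     return True
-- ===== SOURCE B (Python) =====
-- def is_course_valid(slots):
--     cats = sorted(slot[0] for slot in slots)
--     return all(a != b for a, b in zip(cats, cats[1:]))
-- ===== Notes on version B (the rewrite author's own statement) =====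
-- stated objective: alternative
-- what changed: Replaces A's incremental seen-set with early return by a sort-then-scan: sort the first letters and check that no two adjacent entries of the sorted list are equal; Pre_ excludes lists containing an empty string, on which slot[0] raises IndexError in B's eager pass, while A may return False first if a duplicate category precedes the empty string.
-- outside the precondition, e.g. on is_course_valid(['A1', 'A2', '']): A returns False, B raises IndexError
import Mathlib
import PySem

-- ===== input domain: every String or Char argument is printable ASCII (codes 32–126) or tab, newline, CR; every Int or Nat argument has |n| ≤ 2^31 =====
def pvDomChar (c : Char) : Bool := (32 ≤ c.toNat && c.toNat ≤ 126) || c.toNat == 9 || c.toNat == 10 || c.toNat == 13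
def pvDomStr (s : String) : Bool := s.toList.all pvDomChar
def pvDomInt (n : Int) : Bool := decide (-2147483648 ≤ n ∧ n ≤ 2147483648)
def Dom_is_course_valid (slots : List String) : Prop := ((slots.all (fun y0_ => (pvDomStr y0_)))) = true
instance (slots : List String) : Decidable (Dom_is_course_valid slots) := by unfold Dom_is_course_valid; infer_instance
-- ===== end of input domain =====

-- B replaces A's incremental seen-set loop (early return) by sorting the first
-- letters and scanning the sorted list for an equal adjacent pair; objective: alternative.

-- slot[0]: exact (some c) for nonempty slot (guaranteed by Pre_); ' ' is a dummy default never used inside Pre_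
def pvHead (s : String) : Char := (PySem.Str.pyGet? s 0).getD ' '

-- ===== PORT A =====
def pvGoA : List String → PySem.Set Char → Bool
  | [], _ => true
  | slot :: rest, seen =>
    let category := pvHead slot
    if PySem.Set.contains seen category then false
    else pvGoA rest (PySem.Set.add seen category)

def is_course_valid (slots : List String) : Bool := pvGoA slots PySem.Set.empty

-- ===== PORT B =====
def is_course_valid_alt (slots : List String) : Bool :=
  let cats := PySem.List.sorted (slots.map pvHead) (fun x => x) false
  (cats.zip (PySem.List.slice cats (some 1) none)).all (fun p => p.1 != p.2)

-- ===== PRECONDITION & SPEC =====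
-- Pre_ excludes lists containing an empty string: there slot[0] raises IndexError — B's eager pass always raises, while A raises only unless its early return on a duplicate category fires before reaching the empty string
def Pre_is_course_valid (slots : List String) : Prop := ∀ s ∈ slots, s ≠ ""
instance (slots : List String) : Decidable (Pre_is_course_valid slots) := by unfold Pre_is_course_valid; infer_instance
def pvWitness_is_course_valid : List String := ["A1", "B2"]
def Spec_is_course_valid (slots : List String) (out : Bool) : Prop := out = is_course_valid_alt slots
instance (slots : List String) (out : Bool) : Decidable (Spec_is_course_valid slots out) := by unfold Spec_is_course_valid; infer_instance

-- ===== CLAIM (what is proved, stated in full; the proofs are below) =====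
def Claim_equal_is_course_valid : Prop := ∀ (slots : List String), Dom_is_course_valid slots → Pre_is_course_valid slots → Spec_is_course_valid slots (is_course_valid slots)

-- ===== LEMMAS AND PROOFS =====

-- A's loop returns true iff the category letters are pairwise distinct and avoid `seen`.
theorem pvGoA_iff (slots : List String) : ∀ seen : PySem.Set Char,
    pvGoA slots seen = true ↔ (slots.map pvHead).Nodup ∧ ∀ c ∈ slots.map pvHead, ¬ c ∈ seen := by
  induction slots with
  | nil => intro seen; simp [pvGoA]
  | cons slot rest ih =>
    intro seen
    by_cases hc : PySem.Set.contains seen (pvHead slot) = true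
    · have hmem : pvHead slot ∈ seen := (PySem.Set.contains_iff seen (pvHead slot)).mp hc
      simp only [pvGoA]
      rw [if_pos hc]
      simp only [List.map, Bool.false_eq_true, false_iff, not_and]
      intro _ hall
      exact hall (pvHead slot) (by simp) hmem
    · have hmem : ¬ pvHead slot ∈ seen := fun h =>
        hc ((PySem.Set.contains_iff seen (pvHead slot)).mpr h)
      simp only [pvGoA, List.map]
      rw [if_neg hc, ih]
      simp only [List.nodup_cons, List.mem_cons, PySem.Set.mem_add, not_or]
      constructor
      · rintro ⟨hnd, hall⟩
        exact ⟨⟨fun hin => (hall _ hin).2 rfl, hnd⟩,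
          fun c hor => hor.elim (fun he => he ▸ hmem) (fun hin => (hall c hin).1)⟩
      · rintro ⟨⟨hnin, hnd⟩, hall⟩
        exact ⟨hnd, fun c hin => ⟨hall c (Or.inr hin), fun h => hnin (h ▸ hin)⟩⟩

-- On a ≤-sorted list, no equal adjacent pair ↔ no duplicates at all.
theorem pv_adj_nodup : ∀ l : List Char, l.Pairwise (· ≤ ·) →
    (((l.zip l.tail).all (fun p => p.1 != p.2)) = true ↔ l.Nodup) := by
  intro l
  induction l with
  | nil => simp
  | cons a l ih =>
    cases l with
    | nil => simp
    | cons b t =>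
      intro hp
      rcases List.pairwise_cons.mp hp with ⟨ha, hp'⟩
      rcases List.pairwise_cons.mp hp' with ⟨hb, _⟩
      have ihb := ih hp'
      simp only [List.tail_cons] at ihb
      simp only [List.tail_cons, List.zip_cons_cons, List.all_cons, Bool.and_eq_true,
        bne_iff_ne, ne_eq, ihb, List.nodup_cons, List.mem_cons]
      constructor
      · rintro ⟨hab, hnd⟩
        refine ⟨?_, hnd⟩
        have haltb : a < b := lt_of_le_of_ne (ha b (by simp)) hab
        rintro (rfl | hin)
        · exact hab rfl
        · exact absurd rfl (ne_of_lt (lt_of_lt_of_le haltb (hb a hin)))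
      · rintro ⟨hnin, hnd⟩
        exact ⟨fun h => hnin (Or.inl h), hnd⟩

-- ===== VERDICT (by name: the statement is the Claim_ definition above) =====
theorem is_course_valid_spec : Claim_equal_is_course_valid := by
  intro slots _ _
  unfold Spec_is_course_valid is_course_valid is_course_valid_alt
  rw [Bool.eq_iff_iff, pvGoA_iff]
  simp only [PySem.List.slice_from_one]
  rw [pv_adj_nodup _ (PySem.List.sorted_pairwise (slots.map pvHead) (fun x => x)),
    (PySem.List.sorted_perm (slots.map pvHead) (fun x => x) false).nodup_iff]
  simp [PySem.Set.empty]
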